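-- pv_equiv track=rewrite | github.com/cplyon/leetcode | graphs/sort_by_power_value.py | getKth2
-- ===== SOURCE A (Python) =====
-- def getKth2(lo: int, hi: int, k: int) -> int:
--     # memoized approach
--     if lo < 1 or lo > hi or hi > 1000:
--         return -1
--     if k < 1 or k > hi - lo + 1:
--         return -1
--
--     memo = {}
--     memo[1] = 1
--
--     def calculate(n: int) -> int:
--         if n not in memo:
--             if n % 2 == 0:
--                 memo[n] = 1 + calculate(n // 2)
--             else:
--                 memo[n] = 1 + calculate(n*3+1)
--         return memo[n]
--
--     results = {}
--     for i in range(lo, hi+1):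
--         results[i] = calculate(i)
--     return sorted(results.items(), key=lambda x: x[1])[k-1][0]
-- ===== SOURCE B (Python) =====
-- def getKth2(lo: int, hi: int, k: int) -> int:
--     # iterative step-counting, no memo table
--     if lo < 1 or lo > hi or hi > 1000:
--         return -1
--     if k < 1 or k > hi - lo + 1:
--         return -1
--     pairs = []
--     for i in range(lo, hi + 1):
--         n = i
--         count = 1
--         while n != 1:
--             n = n // 2 if n % 2 == 0 else 3 * n + 1
--             count += 1
--         pairs.append((i, count))
--     return sorted(pairs, key=lambda p: p[1])[k - 1][0]
-- ===== Notes on version B (the rewrite author's own statement) =====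
-- stated objective: simpler
-- what changed: Replaces the memoized recursive power-value computation and its dicts with a per-number iterative Collatz step counter building a plain list of (i, power) pairs, then one stable sort.
import Mathlib
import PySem

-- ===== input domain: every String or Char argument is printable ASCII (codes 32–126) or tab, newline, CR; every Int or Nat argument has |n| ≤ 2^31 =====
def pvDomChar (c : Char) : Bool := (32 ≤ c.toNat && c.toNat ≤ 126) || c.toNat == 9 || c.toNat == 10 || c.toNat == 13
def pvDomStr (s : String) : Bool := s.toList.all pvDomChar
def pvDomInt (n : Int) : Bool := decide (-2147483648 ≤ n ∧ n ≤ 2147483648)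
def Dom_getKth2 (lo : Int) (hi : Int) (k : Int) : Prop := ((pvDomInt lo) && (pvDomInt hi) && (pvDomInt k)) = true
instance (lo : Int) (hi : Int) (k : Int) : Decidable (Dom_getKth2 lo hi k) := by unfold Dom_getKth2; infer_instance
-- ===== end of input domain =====

-- B replaces A's memoized recursive power computation by a direct iterative step counter per number; return values proved equal.

-- ===== PORT A =====
-- the Collatz step n//2 / 3n+1 (written n*3+1 as in A)
def pvStepA (n : Int) : Int :=
  if PySem.Int.mod n 2 = 0 then PySem.Int.floordiv n 2 else n * 3 + 1

-- `calculate` with the memo threaded explicitly; fuel makes the unproven Collatz recursion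
-- structural (fuel 200000 is never exhausted on the guarded range, proved below)
def pvCalc : Nat → PySem.Dict Int Int → Int → Int × PySem.Dict Int Int
  | 0, memo, _ => (0, memo)
  | f + 1, memo, n =>
    match memo.get? n with
    | some v => (v, memo)
    | none =>
      let r := pvCalc f memo (pvStepA n)
      (1 + r.1, r.2.insert n (1 + r.1))

def getKth2 (lo : Int) (hi : Int) (k : Int) : Int :=
  if lo < 1 ∨ hi < lo ∨ 1000 < hi then -1
  else if k < 1 ∨ hi - lo + 1 < k then -1
  else
    let memo0 : PySem.Dict Int Int := (PySem.Dict.empty).insert 1 1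
    let st := (PySem.List.pyRange lo (hi + 1) 1).foldl
      (fun (st : PySem.Dict Int Int × PySem.Dict Int Int) i =>
        let r := pvCalc 200000 st.2 i
        (st.1.insert i r.1, r.2))
      (PySem.Dict.empty, memo0)
    match PySem.List.pyGet? (PySem.List.sorted st.1.items (fun x => x.2) false) (k - 1) with
    | some p => p.1
    | none => -1  -- unreachable: 1 ≤ k ≤ length

-- ===== PORT B =====
-- `while n != 1: n = step(n); count += 1` with fuel (never exhausted on the guarded range)
def pvCount : Nat → Int → Int → Int
  | 0, _, count => count
  | f + 1, n, count =>
    if n = 1 then count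
    else pvCount f (if PySem.Int.mod n 2 = 0 then PySem.Int.floordiv n 2 else 3 * n + 1) (count + 1)

def getKth2_alt (lo : Int) (hi : Int) (k : Int) : Int :=
  if lo < 1 ∨ hi < lo ∨ 1000 < hi then -1
  else if k < 1 ∨ hi - lo + 1 < k then -1
  else
    let pairs := (PySem.List.pyRange lo (hi + 1) 1).map (fun i => (i, pvCount 200000 i 1))
    match PySem.List.pyGet? (PySem.List.sorted pairs (fun p => p.2) false) (k - 1) with
    | some p => p.1
    | none => -1  -- unreachable: 1 ≤ k ≤ length

-- ===== PRECONDITION & SPEC =====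
def Spec_getKth2 (lo : Int) (hi : Int) (k : Int) (out : Int) : Prop := out = getKth2_alt lo hi k
instance (lo : Int) (hi : Int) (k : Int) (out : Int) : Decidable (Spec_getKth2 lo hi k out) := by unfold Spec_getKth2; infer_instance

-- ===== CLAIM (what is proved, stated in full; the proofs are below) =====
def Claim_equal_getKth2 : Prop := ∀ (lo : Int) (hi : Int) (k : Int), Dom_getKth2 lo hi k → Spec_getKth2 lo hi k (getKth2 lo hi k)

-- ===== LEMMAS AND PROOFS =====

-- reference Collatz power value with fuel (proof-only)
def pvCnt : Nat → Int → Option Int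
  | 0, _ => none
  | f + 1, n => if n = 1 then some 1 else (pvCnt f (pvStepA n)).map (· + 1)

theorem pvCnt_mono : ∀ (f : Nat) (n : Int) (v : Int) (g : Nat), pvCnt f n = some v → f ≤ g → pvCnt g n = some v := by
  intro f
  induction f with
  | zero => intro n v g h _; simp [pvCnt] at h
  | succ f ih =>
    intro n v g h hle
    obtain ⟨g', rfl⟩ : ∃ g', g = g' + 1 := ⟨g - 1, by omega⟩
    by_cases hn : n = 1
    · simp only [pvCnt, hn, if_pos] at h ⊢; exact h
    · simp only [pvCnt, if_neg hn, Option.map_eq_some_iff] at h ⊢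
      obtain ⟨r, hr, rfl⟩ := h
      exact ⟨r, ih _ _ _ hr (by omega), rfl⟩

theorem pvCnt_det {f g : Nat} {n v w : Int} (hf : pvCnt f n = some v) (hg : pvCnt g n = some w) : v = w := by
  have h1 := pvCnt_mono f n v (max f g) hf (le_max_left _ _)
  have h2 := pvCnt_mono g n w (max f g) hg (le_max_right _ _)
  rw [h1] at h2; exact Option.some_inj.mp h2

-- B's loop computes the reference value
theorem pvCount_eq : ∀ (f : Nat) (n : Int) (v : Int) (g : Nat) (c : Int),
    pvCnt f n = some v → f ≤ g → pvCount g n c = c + v - 1 := by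
  intro f
  induction f with
  | zero => intro n v g c h _; simp [pvCnt] at h
  | succ f ih =>
    intro n v g c h hle
    obtain ⟨g', rfl⟩ : ∃ g', g = g' + 1 := ⟨g - 1, by omega⟩
    by_cases hn : n = 1
    · subst hn
      simp only [pvCnt, if_pos] at h
      injection h with hv
      simp only [pvCount, if_pos]
      omega
    · simp only [pvCnt, if_neg hn, Option.map_eq_some_iff] at h
      obtain ⟨r, hr, rfl⟩ := h
      simp only [pvCount, if_neg hn]
      rw [show (if PySem.Int.mod n 2 = 0 then PySem.Int.floordiv n 2 else 3 * n + 1) = pvStepA n by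
        simp [pvStepA, mul_comm]]
      rw [ih _ r g' (c + 1) hr (by omega)]; omega

-- invariant of the memo table
def pvInv (memo : PySem.Dict Int Int) : Prop :=
  memo.get? 1 = some 1 ∧ ∀ m w : Int, memo.get? m = some w → ∃ g, pvCnt g m = some w

theorem pvCalc_spec : ∀ (f : Nat) (n v : Int) (memo : PySem.Dict Int Int),
    pvInv memo → pvCnt f n = some v →
    (pvCalc f memo n).1 = v ∧ pvInv (pvCalc f memo n).2 := by
  intro f
  induction f with
  | zero => intro n v memo _ h; simp [pvCnt] at h
  | succ f ih =>
    intro n v memo hInv h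
    simp only [pvCalc]
    cases hmem : memo.get? n with
    | some w =>
      obtain ⟨g, hg⟩ := hInv.2 n w hmem
      exact ⟨pvCnt_det hg h, hInv⟩
    | none =>
      have hn1 : n ≠ 1 := by
        intro hn; rw [hn, hInv.1] at hmem; simp at hmem
      simp only [pvCnt, if_neg hn1, Option.map_eq_some_iff] at h
      obtain ⟨r, hr, rfl⟩ := h
      obtain ⟨hval, hinv'⟩ := ih (pvStepA n) r memo hInv hr
      constructor
      · simp [hval]; ring
      · constructor
        · rw [PySem.Dict.get?_insert_of_ne _ _ (Ne.symm hn1)]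
          exact hinv'.1
        · intro m w hmw
          rw [PySem.Dict.get?_insert] at hmw
          split at hmw
          · rename_i hmn
            refine ⟨f + 1, ?_⟩
            simp only [pvCnt, hmn, if_neg hn1, hr]
            simp only [Option.map_some]
            rw [← Option.some_inj.mp hmw, hval]
            congr 1; ring
          · exact hinv'.2 m w hmw

-- Nat-level Collatz step, and the bridge from pvStepA on nonnegative inputs
def pvStepN (n : Nat) : Nat := if n % 2 = 0 then n / 2 else 3 * n + 1

theorem pvStepA_ofNat (n : Nat) : pvStepA (n : Int) = ((pvStepN n : Nat) : Int) := by
  have hmod : PySem.Int.mod (n : Int) 2 = (n : Int) % 2 := by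
    simp [PySem.Int.mod, Int.fmod_eq_emod]
  have hdiv : PySem.Int.floordiv (n : Int) 2 = (n : Int) / 2 := by
    simp [PySem.Int.floordiv, Int.fdiv_eq_ediv]
  unfold pvStepA pvStepN
  rw [hmod, hdiv]
  by_cases hp : n % 2 = 0
  · rw [if_pos (show (n : Int) % 2 = 0 by omega), if_pos hp]
    omega
  · rw [if_neg (show ¬ (n : Int) % 2 = 0 by omega), if_neg hp]
    push_cast; ring

theorem pvStepN_pos (n : Nat) (h : 1 ≤ n) : 1 ≤ pvStepN n := by
  unfold pvStepN; split <;> omega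

-- 'from m, some value < bound is reached within f Collatz steps' (bare Nat.rec keeps kernel evaluation cheap)
def pvDrops (f : Nat) (bound : Nat) : Nat → Bool :=
  Nat.rec (motive := fun _ => Nat → Bool)
    (fun m => m < bound)
    (fun _ ih m => m < bound || ih (pvStepN m))
    f

def pvOKaux : Nat → Bool :=
  Nat.rec (motive := fun _ => Bool) true (fun k ih => pvDrops 132 (k + 2) (k + 2) && ih)

-- every 2 ≤ n ≤ 1000 drops below itself within 132 steps (finite kernel check)
def pvOK : Bool := pvOKaux 999

set_option maxRecDepth 1000000 in
set_option maxHeartbeats 4000000 in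
theorem pvOK_true : pvOK = true := by decide

theorem pvDrops_zero (bound m : Nat) : pvDrops 0 bound m = decide (m < bound) := rfl

theorem pvDrops_succ (f bound m : Nat) :
    pvDrops (f + 1) bound m = (decide (m < bound) || pvDrops f bound (pvStepN m)) := rfl

theorem pvOKaux_succ (c : Nat) : pvOKaux (c + 1) = (pvDrops 132 (c + 2) (c + 2) && pvOKaux c) := rfl

theorem pvOKaux_spec : ∀ c : Nat, pvOKaux c = true → ∀ k, k < c → pvDrops 132 (k + 2) (k + 2) = true := by
  intro c
  induction c with
  | zero => intro _ k hk; omega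
  | succ c ih =>
    intro h k hk
    rw [pvOKaux_succ, Bool.and_eq_true] at h
    by_cases hkc : k = c
    · subst hkc; exact h.1
    · exact ih h.2 k (by omega)

theorem pvCnt_succ_step (g : Nat) (m : Nat) (hm : m ≠ 1) (v : Int)
    (h : pvCnt g ((pvStepN m : Nat) : Int) = some v) : pvCnt (g + 1) (m : Int) = some (v + 1) := by
  have hm' : ((m : Int)) ≠ 1 := by omega
  simp only [pvCnt, if_neg hm', pvStepA_ofNat, h, Option.map_some]

theorem pvDrops_cnt : ∀ (f : Nat) (bound m : Nat), pvDrops f bound m = true → 1 ≤ m → 2 ≤ bound →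
    (∀ m', 1 ≤ m' → m' < bound → ∃ v, pvCnt (132 * m') (m' : Int) = some v) →
    ∃ v, pvCnt (132 * (bound - 1) + f) (m : Int) = some v := by
  intro f
  induction f with
  | zero =>
    intro bound m h hm _ hyp
    simp only [pvDrops_zero, decide_eq_true_eq] at h
    obtain ⟨v, hv⟩ := hyp m hm h
    exact ⟨v, pvCnt_mono _ _ _ _ hv (by omega)⟩
  | succ f ih =>
    intro bound m h hm hb hyp
    simp only [pvDrops_succ, Bool.or_eq_true, decide_eq_true_eq] at h
    rcases h with h | h
    · obtain ⟨v, hv⟩ := hyp m hm h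
      exact ⟨v, pvCnt_mono _ _ _ _ hv (by omega)⟩
    · by_cases hlt : m < bound
      · obtain ⟨v, hv⟩ := hyp m hm hlt
        exact ⟨v, pvCnt_mono _ _ _ _ hv (by omega)⟩
      · obtain ⟨v, hv⟩ := ih bound (pvStepN m) h (pvStepN_pos m hm) hb hyp
        exact ⟨v + 1, pvCnt_succ_step _ _ (by omega) _ hv⟩

theorem pvCnt_exists_nat (n : Nat) : 1 ≤ n → n ≤ 1000 → ∃ v, pvCnt (132 * n) (n : Int) = some v := by
  induction n using Nat.strong_induction_on with
  | _ n ih =>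
    intro h1 h2
    by_cases hn : n = 1
    · subst hn
      exact ⟨1, pvCnt_mono 1 1 1 132 rfl (by omega)⟩
    · have hb : 2 ≤ n := by omega
      have hd : pvDrops 132 n n = true := by
        have hx := pvOKaux_spec 999 pvOK_true (n - 2) (by omega)
        rw [show n - 2 + 2 = n by omega] at hx
        exact hx
      obtain ⟨v, hv⟩ := pvDrops_cnt 132 n n hd (by omega) hb
        (fun m' hm1 hm2 => ih m' hm2 hm1 (by omega))
      exact ⟨v, pvCnt_mono _ _ _ _ hv (by omega)⟩

theorem pvCnt_isSome (i : Int) (h1 : 1 ≤ i) (h2 : i ≤ 1000) : ∃ v, pvCnt 200000 i = some v := by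
  obtain ⟨v, hv⟩ := pvCnt_exists_nat i.toNat (by omega) (by omega)
  have hc : ((i.toNat : Nat) : Int) = i := by omega
  rw [hc] at hv
  exact ⟨v, pvCnt_mono _ _ _ _ hv (by omega)⟩

-- the fold in A produces exactly the list of (i, reference value) pairs
theorem pvFold_spec : ∀ (L : List Int) (res memo : PySem.Dict Int Int),
    (∀ i ∈ L, ∃ v, pvCnt 200000 i = some v) → pvInv memo → L.Nodup →
    (∀ i ∈ L, res.contains i = false) →
    (L.foldl (fun (st : PySem.Dict Int Int × PySem.Dict Int Int) i =>
        let r := pvCalc 200000 st.2 i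
        (st.1.insert i r.1, r.2)) (res, memo)).1.items
      = res.items ++ L.map (fun i => (i, (pvCnt 200000 i).getD 0)) := by
  intro L
  induction L with
  | nil => intro res memo _ _ _ _; simp
  | cons i L ih =>
    intro res memo hterm hInv hnd hfresh
    obtain ⟨v, hv⟩ := hterm i (List.mem_cons_self ..)
    obtain ⟨hval, hinv'⟩ := pvCalc_spec 200000 i v memo hInv hv
    simp only [List.foldl_cons]
    rw [ih _ _ (fun j hj => hterm j (List.mem_cons_of_mem _ hj)) hinv'
        (List.Nodup.of_cons hnd)
        (fun j hj => by
          rw [PySem.Dict.contains_insert]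
          have : j ≠ i := by
            intro hji; rw [hji] at hj
            exact (List.nodup_cons.mp hnd).1 hj
          simp [this, hfresh j (List.mem_cons_of_mem _ hj)])]
    rw [PySem.Dict.items_insert_of_not_contains _ _ (hfresh i (List.mem_cons_self ..))]
    simp [hval, hv]

theorem pvLists_eq (lo hi : Int) (h1 : 1 ≤ lo) (h2 : lo ≤ hi) (h3 : hi ≤ 1000) :
    ((PySem.List.pyRange lo (hi + 1) 1).foldl
      (fun (st : PySem.Dict Int Int × PySem.Dict Int Int) i =>
        let r := pvCalc 200000 st.2 i
        (st.1.insert i r.1, r.2))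
      (PySem.Dict.empty, (PySem.Dict.empty : PySem.Dict Int Int).insert 1 1)).1.items
    = (PySem.List.pyRange lo (hi + 1) 1).map (fun i => (i, pvCount 200000 i 1)) := by
  have hterm : ∀ i ∈ PySem.List.pyRange lo (hi + 1) 1, ∃ v, pvCnt 200000 i = some v := by
    intro i hi'
    rw [PySem.List.mem_pyRange_one] at hi'
    exact pvCnt_isSome i (by omega) (by omega)
  have hInv0 : pvInv ((PySem.Dict.empty : PySem.Dict Int Int).insert 1 1) := by
    constructor
    · exact PySem.Dict.get?_insert_self _ _ _
    · intro m w hmw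
      rw [PySem.Dict.get?_insert] at hmw
      split at hmw
      · rename_i hm
        refine ⟨1, ?_⟩
        rw [hm, ← Option.some_inj.mp hmw]
        rfl
      · rw [PySem.Dict.get?_empty] at hmw; simp at hmw
  rw [pvFold_spec _ _ _ hterm hInv0 (PySem.List.nodup_pyRange_one ..)
      (fun i _ => PySem.Dict.contains_empty _)]
  simp only [show (PySem.Dict.empty : PySem.Dict Int Int).items = [] from rfl, List.nil_append]
  apply List.map_congr_left
  intro i hi'
  obtain ⟨v, hv⟩ := hterm i hi'
  rw [hv, pvCount_eq 200000 i v 200000 1 hv le_rfl]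
  simp only [Option.getD_some, Prod.mk.injEq, true_and]
  omega

-- ===== VERDICT (by name: the statement is the Claim_ definition above) =====
theorem getKth2_spec : Claim_equal_getKth2 := by
  unfold Claim_equal_getKth2 Spec_getKth2
  intro lo hi k _
  unfold getKth2 getKth2_alt
  split
  · rfl
  · split
    · rfl
    · rename_i hg1 hg2
      push Not at hg1 hg2
      simp only
      rw [pvLists_eq lo hi (by omega) (by omega) (by omega)]
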